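-- pv_equiv track=rewrite | github.com/Ramprasad-muppana/leetcode | Primes sum - GFG/primes-sum.py | isSumOfTwo
-- ===== SOURCE A (Python) =====
-- def isSumOfTwo (n):
--     def isprime(n):
--         if n<=1:
--             return False
--         else:
--             for i in range(2,int(n**0.5)+1):
--                 if(n%i==0):
--                     return False
--             return True
--
--     if(isprime(n-2)):
--         return "Yes"
--     if(n%2==0):
--         return "Yes"
--     return "No"
-- ===== SOURCE B (Python) =====
-- def isSumOfTwo(n):
--     # Goldbach shortcut: even n -> "Yes".  For odd n the only option is n-2
--     # prime; decide that by building a Sieve of Eratosthenes up to isqrt(n-2)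
--     # and dividing n-2 by the sieve's primes only.
--     if n % 2 == 0:
--         return "Yes"
--     m = n - 2
--     if m < 2:
--         return "No"
--     r = 1
--     while (r + 1) * (r + 1) <= m:
--         r += 1
--     sieve = [True] * (r + 1)
--     sieve[0] = False
--     sieve[1] = False
--     for i in range(2, r + 1):
--         if sieve[i]:
--             for j in range(i * i, r + 1, i):
--                 sieve[j] = False
--     for p in range(2, r + 1):
--         if sieve[p] and m % p == 0:
--             return "No"
--     return "Yes"
-- ===== Notes on version B (the rewrite author's own statement) =====
-- stated objective: alternative
-- what changed: B keeps the even shortcut but tests primality of m = n-2 by first building a Sieve of Eratosthenes up to isqrt(m) (computed by an incremental integer loop, not float sqrt) and then dividing m only by the sieve's primes, instead of A's isprime helper that trial-divides by every integer in 2..int(sqrt(m)).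
import Mathlib
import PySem

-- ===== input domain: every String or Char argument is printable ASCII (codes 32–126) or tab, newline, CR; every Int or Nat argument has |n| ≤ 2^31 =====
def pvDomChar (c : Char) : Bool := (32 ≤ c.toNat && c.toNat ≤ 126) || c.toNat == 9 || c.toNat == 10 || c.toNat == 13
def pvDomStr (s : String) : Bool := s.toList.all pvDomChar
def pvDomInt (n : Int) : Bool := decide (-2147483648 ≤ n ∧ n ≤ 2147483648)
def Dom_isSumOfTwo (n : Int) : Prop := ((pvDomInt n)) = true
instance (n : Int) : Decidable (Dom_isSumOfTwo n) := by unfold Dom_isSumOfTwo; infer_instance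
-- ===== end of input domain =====

-- B keeps the even shortcut but decides primality of m = n-2 with a Sieve of
-- Eratosthenes up to isqrt(m), dividing m only by the sieve's primes, instead of
-- A's trial division by every integer in 2..int(sqrt(m)) (alternative algorithm).

-- ===== PORT A =====
-- the inner for-loop of isprime: return False at the first divisor, True after the range
def pvIsprimeLoop (m : Int) : List Int → Bool
  | [] => true
  | i :: rest => if PySem.Int.mod m i == 0 then false else pvIsprimeLoop m rest

-- `int(m**0.5)` ported as Nat.sqrt: exact for 0 ≤ m ≤ 2^31 (the correctly rounded
-- float sqrt cannot cross an integer boundary there); the m ≤ 1 guard keeps the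
-- sqrt from being applied to negatives, as in the Python.
def pvIsprime (m : Int) : Bool :=
  if m ≤ 1 then false
  else pvIsprimeLoop m (PySem.List.pyRange 2 ((Nat.sqrt m.toNat : Int) + 1) 1)

def isSumOfTwo (n : Int) : String :=
  if pvIsprime (n - 2) then "Yes"
  else if PySem.Int.mod n 2 == 0 then "Yes"
  else "No"

-- ===== PORT B =====
-- B's `while (r+1)*(r+1) <= m: r += 1` loop
def pvIsqrtLoop (m r : Int) : Int :=
  if _h : (r + 1) * (r + 1) ≤ m then pvIsqrtLoop m (r + 1) else r
termination_by (m - r).toNat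
decreasing_by
  have : r < m := by nlinarith [sq_nonneg (2 * r + 1)]
  omega

-- B's inner marking loop: `for j in …: sieve[j] = False`
def pvMarkMultiples (s : List Bool) (js : List Int) : List Bool :=
  js.foldl (fun s j => s.set j.toNat false) s

-- B's outer sieve loop over i = 2..r
def pvSieve (r : Int) : List Bool :=
  (PySem.List.pyRange 2 (r + 1) 1).foldl
    (fun s i =>
      if s.getD i.toNat false then
        pvMarkMultiples s (PySem.List.pyRange (i * i) (r + 1) i)
      else s)
    (((List.replicate (r + 1).toNat true).set 0 false).set 1 false)

-- B's final loop: return "No" at the first sieve prime dividing m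
def pvScanLoop (s : List Bool) (m : Int) : List Int → Bool
  | [] => false
  | p :: rest =>
      if s.getD p.toNat false && PySem.Int.mod m p == 0 then true
      else pvScanLoop s m rest

def isSumOfTwo_alt (n : Int) : String :=
  if PySem.Int.mod n 2 == 0 then "Yes"
  else
    let m := n - 2
    if m < 2 then "No"
    else
      let r := pvIsqrtLoop m 1
      let sieve := pvSieve r
      if pvScanLoop sieve m (PySem.List.pyRange 2 (r + 1) 1) then "No" else "Yes"

-- ===== PRECONDITION & SPEC =====
def Spec_isSumOfTwo (n : Int) (out : String) : Prop := out = isSumOfTwo_alt n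
instance (n : Int) (out : String) : Decidable (Spec_isSumOfTwo n out) := by unfold Spec_isSumOfTwo; infer_instance

-- ===== CLAIM (what is proved, stated in full; the proofs are below) =====
def Claim_equal_isSumOfTwo : Prop := ∀ (n : Int), Dom_isSumOfTwo n → Spec_isSumOfTwo n (isSumOfTwo n)

-- ===== LEMMAS AND PROOFS =====

theorem pvIsprimeLoop_false_iff (m : Int) (xs : List Int) :
    pvIsprimeLoop m xs = false ↔ ∃ i ∈ xs, PySem.Int.mod m i = 0 := by
  induction xs with
  | nil => simp [pvIsprimeLoop]
  | cons i rest ih =>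
    by_cases h : PySem.Int.mod m i = 0
    · simp [pvIsprimeLoop, h]
    · simp [pvIsprimeLoop, h, ih]

theorem pvScanLoop_true_iff (s : List Bool) (m : Int) (ps : List Int) :
    pvScanLoop s m ps = true ↔
      ∃ p ∈ ps, s.getD p.toNat false = true ∧ PySem.Int.mod m p = 0 := by
  induction ps with
  | nil => simp [pvScanLoop]
  | cons p rest ih =>
    rw [pvScanLoop]
    simp only [List.getD_eq_getElem?_getD] at ih ⊢
    by_cases h1 : s[p.toNat]?.getD false = true
    · by_cases h2 : PySem.Int.mod m p = 0
      · simp [h1, h2]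
      · simp [h1, h2, ih]
    · simp [h1, ih]

theorem le_sqrt_iff_sq_le (m i : Int) (hm : 0 ≤ m) (hi : 0 ≤ i) :
    i ≤ ((Nat.sqrt m.toNat : Nat) : Int) ↔ i * i ≤ m := by
  constructor
  · intro h
    have h1 : i.toNat ≤ Nat.sqrt m.toNat := by omega
    have h2 : i.toNat * i.toNat ≤ m.toNat := Nat.le_sqrt.mp h1
    have h3 : ((i.toNat : Int)) * ((i.toNat : Int)) ≤ ((m.toNat : Int)) := by exact_mod_cast h2
    rw [Int.toNat_of_nonneg hi, Int.toNat_of_nonneg hm] at h3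
    exact h3
  · intro h
    have h3 : ((i.toNat : Int)) * ((i.toNat : Int)) ≤ ((m.toNat : Int)) := by
      rw [Int.toNat_of_nonneg hi, Int.toNat_of_nonneg hm]; exact h
    have h2 : i.toNat * i.toNat ≤ m.toNat := by exact_mod_cast h3
    have h1 : i.toNat ≤ Nat.sqrt m.toNat := Nat.le_sqrt.mpr h2
    omega

-- the incremental loop computes the integer square root
theorem pvIsqrt_done (m r : Int) (hr : 1 ≤ r) (hrr : r * r ≤ m)
    (h : ¬ (r + 1) * (r + 1) ≤ m) : r = ((Nat.sqrt m.toNat : Nat) : Int) := by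
  have h1 : r ≤ ((Nat.sqrt m.toNat : Nat) : Int) :=
    (le_sqrt_iff_sq_le m r (by nlinarith) (by omega)).mpr hrr
  have h2 : ¬ (r + 1 ≤ ((Nat.sqrt m.toNat : Nat) : Int)) := by
    intro hc
    exact h ((le_sqrt_iff_sq_le m (r + 1) (by nlinarith) (by omega)).mp hc)
  omega

theorem pvIsqrtLoop_eq_aux (m : Int) :
    ∀ (k : Nat) (r : Int), (m - r).toNat ≤ k → 1 ≤ r → r * r ≤ m →
      pvIsqrtLoop m r = ((Nat.sqrt m.toNat : Nat) : Int) := by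
  intro k
  induction k with
  | zero =>
    intro r hk hr hrr
    have hmr : m ≤ r := by omega
    have hnot : ¬ (r + 1) * (r + 1) ≤ m := by intro hc; nlinarith
    rw [pvIsqrtLoop, dif_neg hnot]
    exact pvIsqrt_done m r hr hrr hnot
  | succ k ih =>
    intro r hk hr hrr
    rw [pvIsqrtLoop]
    by_cases h : (r + 1) * (r + 1) ≤ m
    · rw [dif_pos h]
      have : r < m := by nlinarith
      exact ih (r + 1) (by omega) (by omega) h
    · rw [dif_neg h]
      exact pvIsqrt_done m r hr hrr h

theorem pvIsqrtLoop_eq (m r : Int) (hr : 1 ≤ r) (hrr : r * r ≤ m) :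
    pvIsqrtLoop m r = ((Nat.sqrt m.toNat : Nat) : Int) :=
  pvIsqrtLoop_eq_aux m (m - r).toNat r le_rfl hr hrr

-- marking multiples of i (all of them composite) never clears a prime entry
theorem pvMarkMultiples_getD_prime (i : Int) (hi : 2 ≤ i) (js : List Int)
    (hjs : ∀ j ∈ js, i ∣ j ∧ i * i ≤ j) (q : Nat) (hq : q.Prime) :
    ∀ s : List Bool, (pvMarkMultiples s js).getD q false = s.getD q false := by
  induction js with
  | nil => intro s; rfl
  | cons j rest ih =>
    intro s
    obtain ⟨hdvd, hsq⟩ := hjs j (List.mem_cons_self ..)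
    have hrest : ∀ j ∈ rest, i ∣ j ∧ i * i ≤ j := fun j hj => hjs j (List.mem_cons_of_mem _ hj)
    have hj4 : 4 ≤ j := by nlinarith
    have hne : j.toNat ≠ q := by
      intro hc
      have hjq : j = (q : Int) := by omega
      have hiq : i.toNat ∣ q := by
        refine Int.natCast_dvd_natCast.mp ?_
        have hcast : (i.toNat : Int) = i := by omega
        rw [hcast, ← hjq]; exact hdvd
      rcases (Nat.Prime.eq_one_or_self_of_dvd hq _ hiq) with h1 | h1
      · omega
      · -- then i = q = j, but j ≥ i*i ≥ 2i > i
        have hqi : (q : Int) = i := by omega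
        nlinarith
    show (pvMarkMultiples (s.set j.toNat false) rest).getD q false = _
    rw [ih hrest (s.set j.toNat false)]
    simp [List.getD_eq_getElem?_getD, List.getElem?_set_ne hne]

-- every prime entry p ≤ r of the finished sieve is still True
theorem pvSieve_getD_prime (r : Int) (q : Nat) (hq : q.Prime) (hqr : (q : Int) ≤ r) :
    (pvSieve r).getD q false = true := by
  unfold pvSieve
  have hstep : ∀ (is : List Int), (∀ i ∈ is, 2 ≤ i) → ∀ s : List Bool,
      s.getD q false = true →
      (is.foldl (fun s i =>
        if s.getD i.toNat false then
          pvMarkMultiples s (PySem.List.pyRange (i * i) (r + 1) i)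
        else s) s).getD q false = true := by
    intro is
    induction is with
    | nil => intro _ s hs; exact hs
    | cons i rest ih =>
      intro hall s hs
      have hi : 2 ≤ i := hall i (List.mem_cons_self ..)
      have hrest : ∀ i ∈ rest, 2 ≤ i := fun i hi => hall i (List.mem_cons_of_mem _ hi)
      simp only [List.foldl_cons]
      apply ih hrest
      by_cases hc : s.getD i.toNat false = true
      · rw [if_pos hc]
        rw [pvMarkMultiples_getD_prime i hi _ ?_ q hq s]
        · exact hs
        · intro j hj
          rw [PySem.List.mem_pyRange_iff_of_pos (by omega)] at hj
          obtain ⟨h1, _, h3⟩ := hj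
          have hdj : i ∣ j := by
            have := dvd_add h3 (dvd_mul_right i i)
            simpa using this
          exact ⟨hdj, h1⟩
      · rw [if_neg hc]; exact hs
  apply hstep
  · intro i hi
    rw [PySem.List.mem_pyRange_one] at hi; omega
  · -- initial sieve: replicate True, then 0 and 1 set to False; q is prime so 2 ≤ q ≤ r
    have h2q : 2 ≤ q := hq.two_le
    have hlt : q < (r + 1).toNat := by omega
    simp [List.getD_eq_getElem?_getD, hlt, List.getElem_set, List.getElem_replicate]
    omega

theorem isSumOfTwo_eq (n : Int) : isSumOfTwo n = isSumOfTwo_alt n := by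
  unfold isSumOfTwo isSumOfTwo_alt
  by_cases hev : (2 : Int) ∣ n
  · have hm : PySem.Int.mod n 2 = 0 := (PySem.Int.mod_eq_zero_iff_dvd n 2).mpr hev
    rw [hm]
    split <;> simp
  · have hmne : PySem.Int.mod n 2 ≠ 0 := fun h => hev ((PySem.Int.mod_eq_zero_iff_dvd n 2).mp h)
    have hmb : (PySem.Int.mod n 2 == 0) = false := by
      simp only [beq_eq_false_iff_ne, ne_eq]
      exact hmne
    rw [hmb]
    simp only [Bool.false_eq_true, if_false]
    by_cases h2 : n - 2 < 2
    · have hpf : pvIsprime (n - 2) = false := by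
        rw [pvIsprime, if_pos (by omega : n - 2 ≤ 1)]
      rw [if_pos h2, hpf]
      simp
    · rw [if_neg h2]
      have hm3 : 3 ≤ n - 2 := by omega
      show (if pvIsprime (n - 2) then "Yes" else "No") =
        (if pvScanLoop (pvSieve (pvIsqrtLoop (n - 2) 1)) (n - 2)
            (PySem.List.pyRange 2 (pvIsqrtLoop (n - 2) 1 + 1) 1) then "No" else "Yes")
      rw [pvIsqrtLoop_eq (n - 2) 1 le_rfl (by omega)]
      have hiff : pvIsprime (n - 2) = false ↔
          pvScanLoop (pvSieve ((Nat.sqrt (n - 2).toNat : Nat) : Int)) (n - 2)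
            (PySem.List.pyRange 2 (((Nat.sqrt (n - 2).toNat : Nat) : Int) + 1) 1) = true := by
        rw [pvIsprime, if_neg (by omega), pvIsprimeLoop_false_iff, pvScanLoop_true_iff]
        constructor
        · rintro ⟨i, hi, hmod⟩
          rw [PySem.List.mem_pyRange_one] at hi
          obtain ⟨hi2, hiR⟩ := hi
          have hq : (i.toNat.minFac).Prime := Nat.minFac_prime (by omega)
          have hqd : ((i.toNat.minFac : Nat) : Int) ∣ i := by
            have h1 := Nat.minFac_dvd i.toNat
            have h3 := Int.natCast_dvd_natCast.mpr h1
            have h4 : ((i.toNat : Nat) : Int) = i := by omega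
            rwa [h4] at h3
          have hqle := Nat.minFac_le (show 0 < i.toNat by omega)
          have hq2 := hq.two_le
          refine ⟨((i.toNat.minFac : Nat) : Int), ?_, ?_, ?_⟩
          · rw [PySem.List.mem_pyRange_one]; omega
          · have := pvSieve_getD_prime ((Nat.sqrt (n - 2).toNat : Nat) : Int)
              i.toNat.minFac hq (by omega)
            simpa using this
          · rw [PySem.Int.mod_eq_zero_iff_dvd]
            exact hqd.trans ((PySem.Int.mod_eq_zero_iff_dvd (n - 2) i).mp hmod)
        · rintro ⟨p, hp, _, hmod⟩
          exact ⟨p, hp, hmod⟩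
      cases hS : pvScanLoop (pvSieve ((Nat.sqrt (n - 2).toNat : Nat) : Int)) (n - 2)
          (PySem.List.pyRange 2 (((Nat.sqrt (n - 2).toNat : Nat) : Int) + 1) 1) with
      | true => rw [hiff.mpr hS]; simp
      | false =>
        have : pvIsprime (n - 2) = true := by
          cases hA : pvIsprime (n - 2) with
          | true => rfl
          | false => rw [hiff.mp hA] at hS; exact absurd hS (by simp)
        rw [this]; simp

-- ===== VERDICT (by name: the statement is the Claim_ definition above) =====
theorem isSumOfTwo_spec : Claim_equal_isSumOfTwo := by
  intro n _
  exact isSumOfTwo_eq n
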